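-- pv_equiv track=rewrite | github.com/CMU-SAFARI/sasiml | compiler/modules/lowering.py | zeros_systolic
-- ===== SOURCE A (Python) =====
-- def zeros_systolic(mat1,mat2):
--     '''
--     Adapt the matrix to the systolic array dataflow
--     '''
--     mat1_zeros = [[None for x in range(len(mat1[0]))] for y in range(len(mat1)+len(mat1[0])-1)]
--     mat2_zeros = [[None for x in range(len(mat1_zeros))] for y in range(len(mat2))]
--
--     # Matrix 1
--     for x in range(len(mat1_zeros[0])):
--         for y in range(len(mat1_zeros)):
--             if y < x:
--                 mat1_zeros[y][x] = None
--             elif y > (x +len(mat1)-1):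
--                 mat1_zeros[y][x] = None
--             else:
--                 mat1_zeros[y][x] = mat1[y-x][x]
--
--     # Matrix 2
--     for x in range(len(mat2_zeros[0])):
--         if x < len(mat2[0]):
--             mat2_zeros[0][x] = mat2[0][x]
--         else:
--             mat2_zeros[0][x] = None
--     return mat1_zeros, mat2_zeros
-- ===== SOURCE B (Python) =====
-- def zeros_systolic(mat1, mat2):
--     '''
--     Adapt the matrix to the systolic array dataflow
--     '''
--     h, w = len(mat1), len(mat1[0])
--     rows = h + w - 1
--     # column-oriented: pad each source column of mat1 with x leading and
--     # w-1-x trailing Nones, then transpose the padded columns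
--     cols = [[None] * x + [row[x] for row in mat1] + [None] * (w - 1 - x)
--             for x in range(w)]
--     mat1_zeros = [[col[y] for col in cols] for y in range(rows)]
--     row0 = (list(mat2[0]) + [None] * rows)[:rows]
--     mat2_zeros = [row0] + [[None] * rows for _ in range(len(mat2) - 1)]
--     return mat1_zeros, mat2_zeros
-- ===== Notes on version B (the rewrite author's own statement) =====
-- stated objective: alternative
-- what changed: column-oriented construction: instead of A's per-output-cell gather with three-way branching over a preallocated grid, B extracts each source column of mat1, pads it with x leading and w-1-x trailing Nones, and transposes the padded columns; mat2's first row is built by pad-and-slice instead of an index loop over a preallocated grid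
import Mathlib
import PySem

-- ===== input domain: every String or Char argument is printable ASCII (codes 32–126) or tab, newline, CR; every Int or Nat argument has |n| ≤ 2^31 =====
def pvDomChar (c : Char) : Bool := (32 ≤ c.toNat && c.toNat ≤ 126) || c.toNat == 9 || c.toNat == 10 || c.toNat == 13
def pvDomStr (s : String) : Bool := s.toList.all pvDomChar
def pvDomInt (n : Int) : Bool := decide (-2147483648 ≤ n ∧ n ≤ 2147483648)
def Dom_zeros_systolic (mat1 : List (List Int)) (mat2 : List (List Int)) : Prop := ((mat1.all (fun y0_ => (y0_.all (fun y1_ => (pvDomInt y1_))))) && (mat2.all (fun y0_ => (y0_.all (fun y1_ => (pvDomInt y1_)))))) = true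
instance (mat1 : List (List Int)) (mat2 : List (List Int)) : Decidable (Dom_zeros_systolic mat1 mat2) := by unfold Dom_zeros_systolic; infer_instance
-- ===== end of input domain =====

-- B builds the skewed matrix column-wise (pad each source column with Nones, then transpose) instead of
-- A's per-cell gather with branching; equivalence is proved on Pre_, exactly the inputs where A returns.

-- ===== PORT A =====
-- Python's in-place `m[y][x] = v` on a nested list (no-op when out of range; Pre_ keeps indices in range)
def setCell {α : Type} (m : List (List α)) (y x : Nat) (v : α) : List (List α) :=
  match m[y]? with
  | some row => m.set y (row.set x v)
  | none => m

-- literal port of A; all indices are nonnegative, so Python indexing is getElem? (IndexError cases are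
-- exactly the inputs excluded by Pre_, where the missing index makes getElem? return none)
def zeros_systolic (mat1 : List (List Int)) (mat2 : List (List Int)) : List (List (Option Int)) × List (List (Option Int)) :=
  let w := (mat1[0]?.getD []).length                  -- len(mat1[0]); raises on mat1 == [] (outside Pre_)
  let rows := mat1.length + w - 1
  let mz1 := (List.range rows).map (fun _ => (List.range w).map (fun _ => (none : Option Int)))
  let mz2 := (List.range mat2.length).map (fun _ => (List.range mz1.length).map (fun _ => (none : Option Int)))
  let w0 := (mz1[0]?.getD []).length                  -- len(mat1_zeros[0]); raises when rows == 0 (outside Pre_)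
  -- len(mat1_zeros) is invariant under the in-place writes, = rows
  let mz1' := (List.range w0).foldl (fun m x =>
      (List.range rows).foldl (fun m y =>
        if y < x then setCell m y x none
        else if (y : Int) > (x : Int) + (mat1.length : Int) - 1 then setCell m y x none
        else setCell m y x (some ((mat1[y - x]?.getD [])[x]?.getD 0))) m) mz1
  let w20 := (mz2[0]?.getD []).length                 -- len(mat2_zeros[0]); raises on mat2 == [] (outside Pre_)
  let mz2' := (List.range w20).foldl (fun m x =>
      if x < (mat2[0]?.getD []).length then setCell m 0 x (some ((mat2[0]?.getD [])[x]?.getD 0))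
      else setCell m 0 x none) mz2
  (mz1', mz2')

-- ===== PORT B =====
-- literal port of Source B: pad each source column of mat1, transpose the padded columns; mat2's row 0 by
-- pad-and-slice
def zeros_systolic_alt (mat1 : List (List Int)) (mat2 : List (List Int)) : List (List (Option Int)) × List (List (Option Int)) :=
  let h := mat1.length
  let w := (mat1[0]?.getD []).length                  -- len(mat1[0])
  let rows := h + w - 1
  let cols := (List.range w).map (fun x =>
      List.replicate x (none : Option Int)
        ++ mat1.map (fun row => some (row[x]?.getD 0))
        ++ List.replicate (w - 1 - x) (none : Option Int))
  let mz1 := (List.range rows).map (fun y => cols.map (fun col => col[y]?.getD none))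
  let row0 := (((mat2[0]?.getD []).map (fun v => some v)) ++ List.replicate rows (none : Option Int)).take rows
  (mz1, row0 :: List.replicate (mat2.length - 1) (List.replicate rows (none : Option Int)))

-- ===== PRECONDITION & SPEC =====
-- Pre_ is exactly where the Python A returns: len(mat1)+len(mat1[0]) ≥ 2 (else len(mat1[0]) or
-- len(mat1_zeros[0]) raises IndexError), mat2 nonempty (else len(mat2_zeros[0]) raises IndexError),
-- and every mat1 row at least len(mat1[0]) wide (else mat1[y-x][x] raises IndexError).
def Pre_zeros_systolic (mat1 : List (List Int)) (mat2 : List (List Int)) : Prop :=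
  2 ≤ mat1.length + (mat1.headD []).length ∧ mat2 ≠ [] ∧
    ∀ row ∈ mat1, (mat1.headD []).length ≤ row.length
instance (mat1 : List (List Int)) (mat2 : List (List Int)) : Decidable (Pre_zeros_systolic mat1 mat2) := by unfold Pre_zeros_systolic; infer_instance

def pvWitness_zeros_systolic : List (List Int) × List (List Int) := ([[1]], [[2]])

def Spec_zeros_systolic (mat1 : List (List Int)) (mat2 : List (List Int)) (out : List (List (Option Int)) × List (List (Option Int))) : Prop := out = zeros_systolic_alt mat1 mat2
instance (mat1 : List (List Int)) (mat2 : List (List Int)) (out : List (List (Option Int)) × List (List (Option Int))) : Decidable (Spec_zeros_systolic mat1 mat2 out) := by unfold Spec_zeros_systolic; infer_instance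

-- ===== CLAIM (what is proved, stated in full; the proofs are below) =====
def Claim_equal_zeros_systolic : Prop := ∀ (mat1 : List (List Int)) (mat2 : List (List Int)), Dom_zeros_systolic mat1 mat2 → Pre_zeros_systolic mat1 mat2 → Spec_zeros_systolic mat1 mat2 (zeros_systolic mat1 mat2)

-- ===== LEMMAS AND PROOFS =====

-- cell (y,x) of a nested list, as an Option (none = out of range)
def getC {α : Type} (m : List (List α)) (y x : Nat) : Option α :=
  m[y]?.bind (fun r => r[x]?)

theorem length_setCell {α : Type} (m : List (List α)) (y x : Nat) (v : α) :
    (setCell m y x v).length = m.length := by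
  unfold setCell; cases m[y]? <;> simp

theorem getC_setCell {α : Type} (m : List (List α)) (y x y' x' : Nat) (v : α) :
    getC (setCell m y x v) y' x' = if y = y' ∧ x = x' then (getC m y x).map (fun _ => v) else getC m y' x' := by
  unfold setCell getC
  cases hr : m[y]? with
  | none =>
    split_ifs with h
    · obtain ⟨rfl, rfl⟩ := h; simp [hr]
    · rfl
  | some row =>
    have hy : y < m.length := by
      by_contra hc
      rw [List.getElem?_eq_none (by omega)] at hr
      simp at hr
    by_cases hyy : y = y'
    · subst hyy
      have hs : (m.set y (row.set x v))[y]? = some (row.set x v) := by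
        rw [List.getElem?_set, if_pos rfl, if_pos hy]
      rw [hs, hr]
      simp only [Option.bind_some, List.getElem?_set]
      by_cases hxx : x = x'
      · subst hxx
        rw [if_pos (show True ∧ x = x from ⟨trivial, rfl⟩), if_pos (rfl : x = x)]
        by_cases hxr : x < row.length
        · rw [if_pos hxr, List.getElem?_eq_some_iff.mpr ⟨hxr, rfl⟩]; rfl
        · rw [if_neg hxr, List.getElem?_eq_none (by omega)]; rfl
      · rw [if_neg hxx, if_neg (by rintro ⟨_, rfl⟩; exact hxx rfl)]
    · have hs : (m.set y (row.set x v))[y']? = m[y']? := by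
        rw [List.getElem?_set, if_neg hyy]
      rw [hs, if_neg (by rintro ⟨rfl, _⟩; exact hyy rfl)]

theorem getC_foldl_setCell {β : Type} (Y X : β → Nat) (V : β → Option Int) (y x : Nat) (W : Option Int) :
    ∀ (l : List β) (m : List (List (Option Int))),
      (∀ b ∈ l, Y b = y → X b = x → V b = W) →
      getC (l.foldl (fun m b => setCell m (Y b) (X b) (V b)) m) y x
        = if ∃ b ∈ l, Y b = y ∧ X b = x then (getC m y x).map (fun _ => W) else getC m y x := by
  intro l
  induction l with
  | nil => intro m _; simp
  | cons b t ih =>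
    intro m hdet
    simp only [List.foldl_cons]
    rw [ih _ (fun b' hb' => hdet b' (List.mem_cons_of_mem _ hb'))]
    by_cases hb : Y b = y ∧ X b = x
    · obtain ⟨hb1, hb2⟩ := hb
      have hV : V b = W := hdet b List.mem_cons_self hb1 hb2
      have hset : getC (setCell m (Y b) (X b) (V b)) y x = (getC m y x).map (fun _ => W) := by
        rw [getC_setCell, if_pos ⟨hb1, hb2⟩, hb1, hb2, hV]
      rw [hset, if_pos (show ∃ b' ∈ b :: t, Y b' = y ∧ X b' = x from ⟨b, List.mem_cons_self, hb1, hb2⟩)]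
      by_cases ht : ∃ b' ∈ t, Y b' = y ∧ X b' = x
      · rw [if_pos ht]; cases getC m y x <;> rfl
      · rw [if_neg ht]
    · have hset : getC (setCell m (Y b) (X b) (V b)) y x = getC m y x := by
        rw [getC_setCell, if_neg hb]
      rw [hset]
      by_cases ht : ∃ b' ∈ t, Y b' = y ∧ X b' = x
      · rw [if_pos ht, if_pos (show ∃ b' ∈ b :: t, Y b' = y ∧ X b' = x by
          rcases ht with ⟨b', h1, h2⟩; exact ⟨b', List.mem_cons_of_mem _ h1, h2⟩)]
      · rw [if_neg ht, if_neg (show ¬ ∃ b' ∈ b :: t, Y b' = y ∧ X b' = x by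
          rintro ⟨b', h1, h2⟩
          rcases List.mem_cons.mp h1 with rfl | h1
          · exact hb h2
          · exact ht ⟨b', h1, h2⟩)]

theorem eq_of_getC {α : Type} (m₁ m₂ : List (List α)) (hl : m₁.length = m₂.length)
    (h : ∀ y x, getC m₁ y x = getC m₂ y x) : m₁ = m₂ := by
  apply List.ext_getElem?
  intro y
  by_cases hy : y < m₁.length
  · have h1 : m₁[y]? = some m₁[y] := List.getElem?_eq_some_iff.mpr ⟨hy, rfl⟩
    have h2 : m₂[y]? = some (m₂[y]'(by omega)) := List.getElem?_eq_some_iff.mpr ⟨by omega, rfl⟩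
    rw [h1, h2]
    congr 1
    apply List.ext_getElem?
    intro x
    have hx := h y x
    rwa [getC, getC, h1, h2, Option.bind_some, Option.bind_some] at hx
  · rw [List.getElem?_eq_none (by omega), List.getElem?_eq_none (by omega)]

def pairs (xs ys : List Nat) : List (Nat × Nat) := xs.flatMap (fun x => ys.map (fun y => (x, y)))

theorem foldl_pairs {α : Type} (g : α → Nat → Nat → α) (xs ys : List Nat) (a : α) :
    (pairs xs ys).foldl (fun a p => g a p.1 p.2) a
      = xs.foldl (fun a x => ys.foldl (fun a y => g a x y) a) a := by
  simp [pairs, List.foldl_flatMap, List.foldl_map]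

theorem mem_pairs (xs ys : List Nat) (p : Nat × Nat) :
    p ∈ pairs xs ys ↔ p.1 ∈ xs ∧ p.2 ∈ ys := by
  cases p
  simp [pairs, List.mem_flatMap, List.mem_map]

theorem foldl_setCell_zero_cons {α : Type} (g : Nat → α) :
    ∀ (xs : List Nat) (r : List α) (rest : List (List α)),
      xs.foldl (fun m x => setCell m 0 x (g x)) (r :: rest)
        = (xs.foldl (fun r x => r.set x (g x)) r) :: rest := by
  intro xs
  induction xs with
  | nil => intro r rest; rfl
  | cons x t ih => intro r rest; simp only [List.foldl_cons, setCell]; exact ih _ _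

theorem foldl_set_range {α : Type} (g : Nat → α) :
    ∀ (n : Nat) (r : List α), n ≤ r.length →
      (List.range n).foldl (fun r x => r.set x (g x)) r = (List.range n).map g ++ r.drop n := by
  intro n
  induction n with
  | zero => intro r _; simp
  | succ n ih =>
    intro r hn
    rw [List.range_succ, List.foldl_append, ih r (by omega)]
    simp only [List.foldl_cons, List.foldl_nil]
    rw [List.map_append]
    have hlen : ((List.range n).map g).length = n := by simp
    rw [List.set_append_right _ _ (by omega)]
    have hdrop : List.drop n r = r[n]'(by omega) :: List.drop (n + 1) r :=
      List.drop_eq_getElem_cons (by omega)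
    simp only [List.length_map, List.length_range, Nat.sub_self]
    simp
    rw [hdrop]
    rfl

theorem foldl_preserve {α β : Type} (f : α → β → α) (P : α → Prop)
    (h : ∀ a b, P a → P (f a b)) : ∀ (l : List β) (a : α), P a → P (l.foldl f a) := by
  intro l
  induction l with
  | nil => intro a ha; simpa using ha
  | cons b t ih => intro a ha; exact ih _ (h a b ha)

theorem getC_replicate {α : Type} (c : α) (n k y x : Nat) :
    getC (List.replicate n (List.replicate k c)) y x
      = if y < n ∧ x < k then some c else none := by
  by_cases hy : y < n
  · rw [getC, List.getElem?_replicate, if_pos hy]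
    simp only [Option.bind_some, List.getElem?_replicate]
    by_cases hx : x < k
    · rw [if_pos hx, if_pos ⟨hy, hx⟩]
    · rw [if_neg hx, if_neg (by rintro ⟨_, h⟩; exact hx h)]
  · rw [getC, List.getElem?_eq_none (by simp; omega), if_neg (by rintro ⟨h, _⟩; exact hy h)]; rfl

theorem length_double_fold (F : Nat → Nat → Option Int) (l1 l2 : List Nat) (m : List (List (Option Int))) :
    (List.foldl (fun m x => List.foldl (fun m y => setCell m y x (F x y)) m l2) m l1).length = m.length :=
  foldl_preserve (fun m x => List.foldl (fun m y => setCell m y x (F x y)) m l2)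
    (fun mm => mm.length = m.length)
    (fun a b hab => foldl_preserve (fun m y => setCell m y b (F b y)) (fun mm => mm.length = m.length)
      (fun a' b' h' => by show (setCell _ _ _ _).length = m.length; rw [length_setCell]; exact h') l2 a hab) l1 m rfl

theorem getC_double_fold (F : Nat → Nat → Option Int) (w n y x : Nat) (m : List (List (Option Int))) :
    getC (List.foldl (fun m x => List.foldl (fun m y => setCell m y x (F x y)) m (List.range n)) m (List.range w)) y x
      = if x < w ∧ y < n then (getC m y x).map (fun _ => F x y) else getC m y x := by
  rw [← foldl_pairs]
  have hdet : ∀ b ∈ pairs (List.range w) (List.range n),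
      (fun (p : Nat × Nat) => p.2) b = y → (fun (p : Nat × Nat) => p.1) b = x →
      (fun (p : Nat × Nat) => F p.1 p.2) b = F x y := by
    intro b _ h1 h2
    simp only at h1 h2 ⊢
    rw [h1, h2]
  have hiff : (∃ b ∈ pairs (List.range w) (List.range n),
      (fun (p : Nat × Nat) => p.2) b = y ∧ (fun (p : Nat × Nat) => p.1) b = x) ↔ (x < w ∧ y < n) := by
    constructor
    · rintro ⟨b, hb, h1, h2⟩
      rw [mem_pairs] at hb
      simp only at h1 h2
      subst h1; subst h2
      exact ⟨List.mem_range.mp hb.1, List.mem_range.mp hb.2⟩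
    · rintro ⟨h1, h2⟩
      exact ⟨(x, y), (mem_pairs _ _ _).mpr ⟨List.mem_range.mpr h1, List.mem_range.mpr h2⟩, rfl, rfl⟩
  have h2 := getC_foldl_setCell (fun p : Nat × Nat => p.2) (fun p => p.1) (fun p => F p.1 p.2) y x
    (F x y) (pairs (List.range w) (List.range n)) m hdet
  simp only at h2
  rw [h2]
  simp only [hiff]


theorem padded_col_get (mat1 : List (List Int)) (w x y : Nat) (hx : x < w)
    (hy : y < mat1.length + w - 1) :
    (List.replicate x (none : Option Int)
        ++ mat1.map (fun row => some (row[x]?.getD 0))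
        ++ List.replicate (w - 1 - x) (none : Option Int))[y]?
      = some (if x ≤ y ∧ y - x < mat1.length then some ((mat1[y - x]?.getD [])[x]?.getD 0) else none) := by
  by_cases h1 : y < x
  · rw [List.getElem?_append_left (by simp; omega), List.getElem?_append_left (by simpa using h1),
      List.getElem?_replicate, if_pos h1, if_neg (by omega)]
  · by_cases h2 : y - x < mat1.length
    · rw [List.getElem?_append_left (by simp; omega), List.getElem?_append_right (by simp; omega),
        List.getElem?_map]
      simp only [List.length_replicate]
      have hm : mat1[y - x]? = some (mat1[y - x]'h2) := List.getElem?_eq_some_iff.mpr ⟨h2, rfl⟩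
      rw [hm, if_pos (show x ≤ y ∧ y - x < mat1.length from ⟨by omega, h2⟩)]
      simp
    · rw [List.getElem?_append_right (by simp; omega), List.getElem?_replicate,
        if_pos (by simp; omega), if_neg (by omega)]

-- cell (y,x) of B's transposed padded-column matrix
theorem getC_transpose_cols (mat1 : List (List Int)) (rows w y x : Nat)
    (hrows : rows = mat1.length + w - 1) :
    getC ((List.range rows).map (fun y => ((List.range w).map (fun x =>
        List.replicate x (none : Option Int)
          ++ mat1.map (fun row => some (row[x]?.getD 0))
          ++ List.replicate (w - 1 - x) (none : Option Int))).map (fun col => col[y]?.getD none))) y x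
      = if y < rows ∧ x < w then
          some (if x ≤ y ∧ y - x < mat1.length then some ((mat1[y - x]?.getD [])[x]?.getD 0) else none)
        else none := by
  by_cases hy : y < rows
  · rw [getC, List.getElem?_map, List.getElem?_range hy]
    simp only [Option.map_some, Option.bind_some, List.getElem?_map]
    by_cases hx : x < w
    · rw [List.getElem?_range hx]
      simp only [Option.map_some]
      rw [padded_col_get mat1 w x y hx (by omega), if_pos (show y < rows ∧ x < w from ⟨hy, hx⟩)]
      rfl
    · rw [List.getElem?_eq_none (by simp; omega)]
      simp only [Option.map_none]
      rw [if_neg (by rintro ⟨_, h⟩; exact hx h)]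
  · rw [getC, List.getElem?_eq_none (by simp; omega), if_neg (by rintro ⟨h, _⟩; exact hy h)]
    rfl

-- mat2's row 0: pad-and-slice equals the indexed comprehension
theorem row0_eq (r : List Int) (rows : Nat) :
    ((r.map (fun v => some v)) ++ List.replicate rows (none : Option Int)).take rows
      = (List.range rows).map (fun x => if x < r.length then some (r[x]?.getD 0) else none) := by
  apply List.ext_getElem?
  intro x
  by_cases hx : x < rows
  · rw [List.getElem?_take_of_lt hx, List.getElem?_map, List.getElem?_range hx]
    simp only [Option.map_some]
    by_cases hr : x < r.length
    · rw [List.getElem?_append_left (by simp [hr]), List.getElem?_map]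
      have hm : r[x]? = some (r[x]'hr) := List.getElem?_eq_some_iff.mpr ⟨hr, rfl⟩
      rw [hm]
      simp only [Option.map_some, if_pos hr]
      rfl
    · rw [List.getElem?_append_right (by simp; omega), List.getElem?_replicate,
        if_pos (by simp; omega), if_neg hr]
  · rw [List.getElem?_eq_none (by simp; omega), List.getElem?_eq_none (by simp; omega)]

-- ===== VERDICT (by name: the statement is the Claim_ definition above) =====
theorem zeros_systolic_spec : Claim_equal_zeros_systolic := by
  intro mat1 mat2 _hdom hpre
  obtain ⟨hp1, hp2, hp3⟩ := hpre
  have hhead : mat1.headD [] = mat1[0]?.getD [] := by cases mat1 <;> rfl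
  rw [hhead] at hp1 hp3
  have hm2 : 0 < mat2.length := List.length_pos_iff.mpr hp2
  have hm1 : mat1 ≠ [] := by intro he; rw [he] at hp1; simp at hp1
  have hh1 : 0 < mat1.length := List.length_pos_iff.mpr hm1
  have hrows : 0 < mat1.length + (mat1[0]?.getD []).length - 1 := by omega
  unfold Spec_zeros_systolic zeros_systolic zeros_systolic_alt
  simp only [List.length_range, List.map_const', List.length_replicate]
  have e1 : ((List.replicate (mat1.length + (mat1[0]?.getD []).length - 1)
      (List.replicate (mat1[0]?.getD []).length (none : Option Int)))[0]?.getD []).length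
      = (mat1[0]?.getD []).length := by
    rw [List.getElem?_replicate, if_pos hrows]; simp
  have e2 : ((List.replicate mat2.length
      (List.replicate (mat1.length + (mat1[0]?.getD []).length - 1) (none : Option Int)))[0]?.getD []).length
      = mat1.length + (mat1[0]?.getD []).length - 1 := by
    rw [List.getElem?_replicate, if_pos hm2]; simp
  rw [e1, e2]
  simp only [Prod.mk.injEq]
  constructor
  · -- first components
    have hstep : (fun (m : List (List (Option Int))) (x : Nat) =>
        List.foldl (fun m y =>
          if y < x then setCell m y x none
          else if (y : Int) > (x : Int) + (mat1.length : Int) - 1 then setCell m y x none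
          else setCell m y x (some ((mat1[y - x]?.getD [])[x]?.getD 0))) m
          (List.range (mat1.length + (mat1[0]?.getD []).length - 1)))
        = (fun m x =>
        List.foldl (fun m y => setCell m y x
          (if y < x then none
           else if (y : Int) > (x : Int) + (mat1.length : Int) - 1 then none
           else some ((mat1[y - x]?.getD [])[x]?.getD 0))) m
          (List.range (mat1.length + (mat1[0]?.getD []).length - 1))) := by
      funext m x; congr 1; funext m y; split_ifs <;> rfl
    rw [hstep]
    apply eq_of_getC
    · rw [length_double_fold]; simp
    · intro y x
      rw [getC_double_fold, getC_replicate,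
        getC_transpose_cols mat1 (mat1.length + (mat1[0]?.getD []).length - 1)
          (mat1[0]?.getD []).length y x rfl]
      split_ifs <;> first | rfl | omega
  · -- second components
    have hstep2 : (fun (m : List (List (Option Int))) (x : Nat) =>
        if x < (mat2[0]?.getD []).length then setCell m 0 x (some ((mat2[0]?.getD [])[x]?.getD 0))
        else setCell m 0 x none)
        = (fun m x => setCell m 0 x
          (if x < (mat2[0]?.getD []).length then some ((mat2[0]?.getD [])[x]?.getD 0) else none)) := by
      funext m x; split_ifs <;> rfl
    rw [hstep2]
    have hsplit : List.replicate mat2.length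
        (List.replicate (mat1.length + (mat1[0]?.getD []).length - 1) (none : Option Int))
        = List.replicate (mat1.length + (mat1[0]?.getD []).length - 1) (none : Option Int) ::
          List.replicate (mat2.length - 1)
            (List.replicate (mat1.length + (mat1[0]?.getD []).length - 1) (none : Option Int)) := by
      conv_lhs => rw [show mat2.length = (mat2.length - 1) + 1 by omega]
      rw [List.replicate_succ]
    rw [hsplit, foldl_setCell_zero_cons]
    congr 1
    rw [foldl_set_range _ (mat1.length + (mat1[0]?.getD []).length - 1)
      (List.replicate (mat1.length + (mat1[0]?.getD []).length - 1) (none : Option Int)) (by simp)]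
    rw [row0_eq]
    simp
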